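-- pv_equiv track=rewrite | github.com/kenbin64/butterflyfx_kernel | core/fibonacci.py | fibonacci_spiral_coords
-- ===== SOURCE A (Python) =====
-- from typing import List, Tuple
--
-- def fibonacci_squares(n: int) -> List[int]:
--     """
--     Return the first n Fibonacci numbers (starting from 1,1,...).
--
--     Useful for geometric tiling sizes.
--     """
--     if n <= 0:
--         return []
--     seq = [1, 1]
--     while len(seq) < n:
--         seq.append(seq[-1] + seq[-2])
--     return seq[:n]
--
-- def fibonacci_spiral_coords(n: int) -> List[Tuple[int, int, int, int]]:
--     """
--     Simple placement algorithm for n Fibonacci squares.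
--
--     Returns a list of tuples (x, y, size, orientation_index).
--     This is a helper for visualization and tiling; not used in core math.
--     """
--     sizes = fibonacci_squares(n)
--     x = y = 0
--     coords = []
--     dir_idx = 0
--     dirs = [(1, 0), (0, 1), (-1, 0), (0, -1)]
--     for s in sizes:
--         dx, dy = dirs[dir_idx % 4]
--         coords.append((x, y, s, dir_idx % 4))
--         x += dx * s
--         y += dy * s
--         dir_idx += 1
--     return coords
-- ===== SOURCE B (Python) =====
-- from itertools import accumulate
-- from typing import List, Tuple
--
-- def fibonacci_spiral_coords(n: int) -> List[Tuple[int, int, int, int]]: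
--     a, b = 1, 1
--     sizes = []
--     for _ in range(n):
--         sizes.append(a)
--         a, b = b, a + b
--     dx = [s if i % 4 == 0 else -s if i % 4 == 2 else 0 for i, s in enumerate(sizes)]
--     dy = [s if i % 4 == 1 else -s if i % 4 == 3 else 0 for i, s in enumerate(sizes)]
--     xs = accumulate(dx, initial=0)
--     ys = accumulate(dy, initial=0)
--     return [(x, y, s, i % 4) for (x, y), (i, s) in zip(zip(xs, ys), enumerate(sizes))]
-- ===== Notes on version B (the rewrite author's own statement) =====
-- stated objective: alternative
-- what changed: A walks the spiral with mutable state (x, y, dir_idx) updated per step; B is a direct-style pipeline: it generates the Fibonacci sizes with a rolling pair, derives per-index delta lists from the orientation i % 4, obtains the positions as prefix sums via itertools.accumulate, and zips positions, sizes and orientations together.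
import Mathlib
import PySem

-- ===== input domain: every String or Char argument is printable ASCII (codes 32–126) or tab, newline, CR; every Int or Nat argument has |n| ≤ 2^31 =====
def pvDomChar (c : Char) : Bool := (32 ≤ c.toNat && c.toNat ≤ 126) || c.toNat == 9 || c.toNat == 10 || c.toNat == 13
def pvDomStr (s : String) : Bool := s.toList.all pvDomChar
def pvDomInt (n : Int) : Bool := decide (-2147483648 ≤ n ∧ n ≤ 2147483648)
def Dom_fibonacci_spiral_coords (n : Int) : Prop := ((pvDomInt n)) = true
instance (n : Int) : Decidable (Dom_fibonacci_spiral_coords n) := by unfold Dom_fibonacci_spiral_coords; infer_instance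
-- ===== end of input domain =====

-- B replaces A's stateful walk (x, y, dir_idx mutated in a loop) by a direct-style pipeline:
-- per-index delta lists, prefix sums (accumulate) for the positions, and a zip — same values, different decomposition ('alternative').

-- ===== PORT A =====
-- while len(seq) < n: seq.append(seq[-1] + seq[-2]); seq always has ≥ 2 elements here, so the defaults are never used
def fibonacci_squares_go (n : Int) (seq : List Int) : List Int :=
  if (seq.length : Int) < n then
    fibonacci_squares_go n (seq ++ [PySem.List.pyGetD seq (-1) 0 + PySem.List.pyGetD seq (-2) 0])
  else seq
termination_by (n - seq.length).toNat
decreasing_by simp; omega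

def fibonacci_squares (n : Int) : List Int :=
  if n ≤ 0 then []
  else PySem.List.slice (fibonacci_squares_go n [1, 1]) none (some n)

-- the body of A's 'for s in sizes' loop; state = (x, y, coords, dir_idx)
def fib_spiral_stepA (st : Int × Int × List (Int × Int × Int × Int) × Int) (s : Int) :
    Int × Int × List (Int × Int × Int × Int) × Int :=
  let d := PySem.List.pyGetD ([(1, 0), (0, 1), (-1, 0), (0, -1)] : List (Int × Int))
             (PySem.Int.mod st.2.2.2 4) (0, 0)
  (st.1 + d.1 * s, st.2.1 + d.2 * s,
   st.2.2.1 ++ [(st.1, st.2.1, s, PySem.Int.mod st.2.2.2 4)], st.2.2.2 + 1)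

def fibonacci_spiral_coords (n : Int) : List (Int × Int × Int × Int) :=
  ((fibonacci_squares n).foldl fib_spiral_stepA (0, 0, [], 0)).2.2.1

-- ===== PORT B =====
-- for _ in range(n): sizes.append(a); a, b = b, a + b
def fib_sizes_alt (n : Int) : List Int :=
  ((PySem.List.pyRange 0 n 1).foldl
    (fun (st : Int × Int × List Int) _ => (st.2.1, st.1 + st.2.1, st.2.2 ++ [st.1]))
    (1, 1, ([] : List Int))).2.2

-- the two delta comprehensions over enumerate(sizes)
def fib_dxB (p : Int × Int) : Int :=
  if PySem.Int.mod p.1 4 = 0 then p.2 else if PySem.Int.mod p.1 4 = 2 then -p.2 else 0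
def fib_dyB (p : Int × Int) : Int :=
  if PySem.Int.mod p.1 4 = 1 then p.2 else if PySem.Int.mod p.1 4 = 3 then -p.2 else 0

-- the final zip comprehension body: ((x, y), (i, s)) ↦ (x, y, s, i % 4)
def fib_outB (q : (Int × Int) × Int × Int) : Int × Int × Int × Int :=
  (q.1.1, q.1.2, q.2.2, PySem.Int.mod q.2.1 4)

def fibonacci_spiral_coords_alt (n : Int) : List (Int × Int × Int × Int) :=
  let sizes := fib_sizes_alt n
  let dx := (PySem.List.enumerate sizes).map fib_dxB
  let dy := (PySem.List.enumerate sizes).map fib_dyB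
  let xs := List.scanl (· + ·) 0 dx        -- accumulate(dx, initial=0)
  let ys := List.scanl (· + ·) 0 dy
  (List.zip (List.zip xs ys) (PySem.List.enumerate sizes)).map fib_outB

-- ===== PRECONDITION & SPEC =====
def Spec_fibonacci_spiral_coords (n : Int) (out : List (Int × Int × Int × Int)) : Prop := out = fibonacci_spiral_coords_alt n
instance (n : Int) (out : List (Int × Int × Int × Int)) : Decidable (Spec_fibonacci_spiral_coords n out) := by unfold Spec_fibonacci_spiral_coords; infer_instance

-- ===== CLAIM (what is proved, stated in full; the proofs are below) =====
def Claim_equal_fibonacci_spiral_coords : Prop := ∀ (n : Int), Dom_fibonacci_spiral_coords n → Spec_fibonacci_spiral_coords n (fibonacci_spiral_coords n)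

-- ===== LEMMAS AND PROOFS =====

-- the first m Fibonacci numbers starting from (a, b): common reference of both sizes computations
def fibAux : Nat → Int → Int → List Int
  | 0, _, _ => []
  | m + 1, a, b => a :: fibAux m b (a + b)

-- the values A's while loop appends when the last two elements are (a, b)
def gAux : Nat → Int → Int → List Int
  | 0, _, _ => []
  | m + 1, a, b => (a + b) :: gAux m b (a + b)

def dxc (k : Nat) : Int := if k % 4 = 0 then 1 else if k % 4 = 2 then -1 else 0
def dyc (k : Nat) : Int := if k % 4 = 1 then 1 else if k % 4 = 3 then -1 else 0

-- reference spiral: element j of the result, positions as running sums, orientation (k + j) % 4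
def spiralSpec : List Int → Int → Int → Nat → List (Int × Int × Int × Int)
  | [], _, _, _ => []
  | s :: rest, x, y, k =>
      (x, y, s, ((k % 4 : Nat) : Int)) :: spiralSpec rest (x + dxc k * s) (y + dyc k * s) (k + 1)

lemma length_fibAux (m : Nat) : ∀ a b, (fibAux m a b).length = m := by
  induction m with
  | zero => intro a b; rfl
  | succ m ih => intro a b; simp [fibAux, ih]

lemma gAux_eq_fibAux (m : Nat) : ∀ a b, gAux m a b = fibAux m (a + b) (a + 2 * b) := by
  induction m with
  | zero => intro a b; rfl
  | succ m ih =>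
      intro a b
      simp only [gAux, fibAux, ih]
      congr 1
      ring_nf

lemma mod_four_natCast (k : Nat) : PySem.Int.mod (k : Int) 4 = ((k % 4 : Nat) : Int) := by
  exact_mod_cast PySem.Int.mod_natCast k 4

-- ===== A side =====

lemma go_eq (n : Int) : ∀ (m : Nat) (l : List Int) (a b : Int),
    (n - (l.length + 2)).toNat = m →
    fibonacci_squares_go n (l ++ [a, b]) = (l ++ [a, b]) ++ gAux m a b := by
  intro m
  induction m with
  | zero =>
      intro l a b hm
      rw [fibonacci_squares_go]
      have hng : ¬ (((l ++ [a, b]).length : Int) < n) := by simp; omega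
      rw [if_neg hng]
      simp [gAux]
  | succ m ih =>
      intro l a b hm
      rw [fibonacci_squares_go]
      have hlt : (((l ++ [a, b]).length : Int) < n) := by simp; omega
      have h1 : PySem.List.pyGetD (l ++ [a, b]) (-1) 0 = b := by
        have : l ++ [a, b] = (l ++ [a]) ++ [b] := by simp
        rw [this, PySem.List.pyGetD_neg_one_append_singleton]
      have h2 : PySem.List.pyGetD (l ++ [a, b]) (-2) 0 = a := by
        rw [PySem.List.pyGetD_neg_ofNat (l ++ [a, b]) 2 0 (by omega) (by simp)]
        simp
      rw [if_pos hlt, h1, h2]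
      have hre : (l ++ [a, b]) ++ [b + a] = (l ++ [a]) ++ [b, a + b] := by
        rw [show b + a = a + b from add_comm b a]; simp
      rw [hre, ih (l ++ [a]) b (a + b) (by simp at hm ⊢; omega)]
      simp [gAux]

lemma fibonacci_squares_eq (n : Int) : fibonacci_squares n = fibAux n.toNat 1 1 := by
  by_cases hn : n ≤ 0
  · have : n.toNat = 0 := by omega
    simp [fibonacci_squares, hn, this, fibAux]
  · have hgo : fibonacci_squares_go n [1, 1] = [1, 1] ++ gAux (n - 2).toNat 1 1 := by
      simpa using go_eq n (n - 2).toNat [] 1 1 (by simp)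
    rw [fibonacci_squares, if_neg (by omega), hgo, gAux_eq_fibAux]
    rw [PySem.List.slice_to _ (by omega)]
    by_cases h1 : n = 1
    · subst h1; simp [fibAux]
    · have h2 : 2 ≤ n := by omega
      have hlen : ([1, 1] ++ fibAux (n - 2).toNat (1 + 1) (1 + 2 * 1)).length = n.toNat := by
        simp [length_fibAux]; omega
      rw [List.take_of_length_le (by omega)]
      have hsplit : n.toNat = (n - 2).toNat + 2 := by omega
      rw [hsplit]
      simp [fibAux]

lemma loopA_eq (sizes : List Int) : ∀ (k : Nat) (x y : Int) (acc : List (Int × Int × Int × Int)),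
    (sizes.foldl fib_spiral_stepA (x, y, acc, (k : Int))).2.2.1 = acc ++ spiralSpec sizes x y k := by
  induction sizes with
  | nil => intro k x y acc; simp [spiralSpec]
  | cons s rest ih =>
      intro k x y acc
      have hmod := mod_four_natCast k
      have hstep : fib_spiral_stepA (x, y, acc, (k : Int)) s =
          (x + dxc k * s, y + dyc k * s, acc ++ [(x, y, s, ((k % 4 : Nat) : Int))], ((k + 1 : Nat) : Int)) := by
        simp only [fib_spiral_stepA, hmod]
        have h4 : k % 4 = 0 ∨ k % 4 = 1 ∨ k % 4 = 2 ∨ k % 4 = 3 := by omega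
        rcases h4 with h | h | h | h <;> simp [h, dxc, dyc, PySem.List.pyGetD, PySem.List.pyGet?, PySem.List.pyIdx?]
      simp only [List.foldl_cons, hstep, ih, spiralSpec]
      simp

-- ===== B side =====

lemma fib_sizes_alt_foldl : ∀ (l : List Int) (a b : Int) (out : List Int),
    (l.foldl (fun (st : Int × Int × List Int) _ => (st.2.1, st.1 + st.2.1, st.2.2 ++ [st.1]))
      (a, b, out)).2.2 = out ++ fibAux l.length a b := by
  intro l
  induction l with
  | nil => intro a b out; simp [fibAux]
  | cons _ t ih => intro a b out; simp [fibAux, ih]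

lemma fib_sizes_alt_eq (n : Int) : fib_sizes_alt n = fibAux n.toNat 1 1 := by
  unfold fib_sizes_alt
  rw [fib_sizes_alt_foldl]
  simp [PySem.List.length_pyRange_one]

lemma zipB_eq (sizes : List Int) : ∀ (k : Nat) (x y : Int),
    (List.zip (List.zip (List.scanl (· + ·) x ((PySem.List.enumerate sizes (k : Int)).map fib_dxB))
                        (List.scanl (· + ·) y ((PySem.List.enumerate sizes (k : Int)).map fib_dyB)))
              (PySem.List.enumerate sizes (k : Int))).map fib_outB
      = spiralSpec sizes x y k := by
  induction sizes with
  | nil => intro k x y; simp [PySem.List.enumerate_nil, spiralSpec]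
  | cons s rest ih =>
      intro k x y
      have hmod := mod_four_natCast k
      have h4 : k % 4 = 0 ∨ k % 4 = 1 ∨ k % 4 = 2 ∨ k % 4 = 3 := by omega
      have hdx : fib_dxB ((k : Int), s) = dxc k * s := by
        simp only [fib_dxB, hmod]
        rcases h4 with h | h | h | h <;> simp [h, dxc]
      have hdy : fib_dyB ((k : Int), s) = dyc k * s := by
        simp only [fib_dyB, hmod]
        rcases h4 with h | h | h | h <;> simp [h, dyc]
      have hk1 : (k : Int) + 1 = ((k + 1 : Nat) : Int) := by push_cast; ring
      simp only [PySem.List.enumerate_cons, List.map_cons, List.scanl_cons, List.zip_cons_cons,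
        List.map_cons, hdx, hdy, hk1, ih, spiralSpec, fib_outB, hmod]

-- ===== tie together =====

lemma both_eq (n : Int) : fibonacci_spiral_coords n = fibonacci_spiral_coords_alt n := by
  unfold fibonacci_spiral_coords fibonacci_spiral_coords_alt
  rw [fibonacci_squares_eq, fib_sizes_alt_eq]
  have hA := loopA_eq (fibAux n.toNat 1 1) 0 0 0 []
  have hB := zipB_eq (fibAux n.toNat 1 1) 0 0 0
  simp only [Nat.cast_zero] at hA hB
  rw [hA, hB]
  simp

-- ===== VERDICT (by name: the statement is the Claim_ definition above) =====
theorem fibonacci_spiral_coords_spec : Claim_equal_fibonacci_spiral_coords := by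
  intro n _
  unfold Spec_fibonacci_spiral_coords
  exact both_eq n
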